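-- pv_equiv track=rewrite | github.com/nishnath-209/BTP | RTI/outputextraction.py | question_to_files
-- ===== SOURCE A (Python) =====
-- def question_to_files(question_numbers):
--     """
--     Converts question numbers to file numbers using the definitive logic:
--     - Inverse relationship (q_no down, file_no up).
--     - Anchored at file 4371 for the q=1-375 block.
--     - Handles specific anomalous questions.
--     """
--     # --- Step 1: Build the definitive mapping for questions 1-375 ---
--
--     # Anomalous questions that only have one unstarred file
--     anomalous_unstarred_only = {64, 113, 123, 215}
--
--     file_map = {}
--
--     # NEW ANCHOR: The highest file number for this block is 4371.
--     # We start the counter at 4372 because we decrement *before* assigning.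
--     current_file_number = 4372
--
--     # Iterate FORWARDS from q=1 to q=375, assigning file numbers from the TOP DOWN.
--     for q in range(1, 376):
--         if q in anomalous_unstarred_only:
--             # This question has only ONE unstarred file.
--             current_file_number -= 1
--             file_map[q] = [current_file_number]
--         else:
--             # This is a normal question with TWO files (starred & unstarred).
--             current_file_number -= 2
--             starred = current_file_number
--             unstarred = starred + 1
--             file_map[q] = [starred, unstarred]
--
--     # --- Step 2: Use the generated map to find the requested files ---
--
--     files = []
--     for q in question_numbers:
--         if 1 <= q <= 375:
--             # Look up the correctly calculated file numbers from our map
--             if q in file_map: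
--                 files.extend(file_map[q])
--
--         elif 376 <= q <= 4000:
--             # This logic remains unchanged
--             file_num = 4001 - q
--             files.append(file_num)
--
--         else:
--             # Question number outside known range
--             raise ValueError(f"Question number {q} is out of valid range (1-4000).")
--
--     return sorted(files)
-- ===== SOURCE B (Python) =====
-- def question_to_files(question_numbers):
--     anomalous = (64, 113, 123, 215)
--     files = []
--     for q in question_numbers:
--         if 1 <= q <= 375:
--             below = sum(1 for a in anomalous if a < q)
--             counter = 4372 - 2 * (q - 1) + below
--             if q in anomalous:
--                 files.append(counter - 1)
--             else:
--                 files.extend((counter - 2, counter - 1))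
--         elif 376 <= q <= 4000:
--             files.append(4001 - q)
--         else:
--             raise ValueError(f"Question number {q} is out of valid range (1-4000).")
--     return sorted(files)
-- ===== Notes on version B (the rewrite author's own statement) =====
-- stated objective: simpler
-- what changed: B drops A's 375-entry top-down table build entirely and computes each question's file numbers with a per-question closed form (counter = 4372 - 2*(q-1) + count of anomalous numbers below q).
import Mathlib
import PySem

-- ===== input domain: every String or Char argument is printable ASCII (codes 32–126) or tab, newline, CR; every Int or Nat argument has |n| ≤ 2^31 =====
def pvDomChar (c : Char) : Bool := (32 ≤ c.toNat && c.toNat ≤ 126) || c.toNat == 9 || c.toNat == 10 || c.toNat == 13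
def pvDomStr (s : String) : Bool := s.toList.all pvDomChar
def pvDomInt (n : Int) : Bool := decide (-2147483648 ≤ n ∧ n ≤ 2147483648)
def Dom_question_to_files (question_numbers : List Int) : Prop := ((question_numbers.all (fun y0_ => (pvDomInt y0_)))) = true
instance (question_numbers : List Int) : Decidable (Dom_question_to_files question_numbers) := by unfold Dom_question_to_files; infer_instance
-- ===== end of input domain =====

set_option maxRecDepth 100000
set_option maxHeartbeats 4000000


-- B replaces A's 375-entry top-down table build with a per-question closed form (objective: simpler).
-- Return-value equivalence only; Pre_ excludes the inputs on which A raises ValueError.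

-- ===== PORT A =====
-- anomalous_unstarred_only = {64, 113, 123, 215}
def pvAnomalousA : List Int := PySem.Set.ofList [64, 113, 123, 215]

-- the forward loop q = 1..375 assigning file numbers top-down into file_map
def pvFileMapA : PySem.Dict Int (List Int) :=
  ((PySem.List.pyRange 1 376 1).foldl
    (fun (st : PySem.Dict Int (List Int) × Int) q =>
      if pvAnomalousA.contains q then
        let c := st.2 - 1
        (st.1.insert q [c], c)
      else
        let c := st.2 - 2
        let starred := c
        let unstarred := starred + 1
        (st.1.insert q [starred, unstarred], c))
    (PySem.Dict.empty, 4372)).1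

-- Step 2 loop; 'none' models the ValueError raise (excluded by Pre_)
def pvLoopA (m : PySem.Dict Int (List Int)) (files : List Int) : List Int → Option (List Int)
  | [] => some files
  | q :: rest =>
    if 1 ≤ q ∧ q ≤ 375 then
      match m.get? q with
      | some fs => pvLoopA m (files ++ fs) rest
      | none => pvLoopA m files rest
    else if 376 ≤ q ∧ q ≤ 4000 then
      pvLoopA m (files ++ [4001 - q]) rest
    else none

def question_to_files (question_numbers : List Int) : List Int :=
  match pvLoopA pvFileMapA [] question_numbers with
  | some fs => PySem.List.sorted fs (fun x => x) false
  | none => []   -- ValueError in Python; outside Pre_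

-- ===== PORT B =====
def pvAnomalousB : List Int := [64, 113, 123, 215]

-- closed-form file list for q in 1..375
def pvFilesB (q : Int) : List Int :=
  let below : Int := (pvAnomalousB.countP (fun a => decide (a < q)) : Nat)
  let counter := 4372 - 2 * (q - 1) + below
  if pvAnomalousB.contains q then [counter - 1] else [counter - 2, counter - 1]

def pvLoopB (files : List Int) : List Int → Option (List Int)
  | [] => some files
  | q :: rest =>
    if 1 ≤ q ∧ q ≤ 375 then
      pvLoopB (files ++ pvFilesB q) rest
    else if 376 ≤ q ∧ q ≤ 4000 then
      pvLoopB (files ++ [4001 - q]) rest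
    else none

def question_to_files_alt (question_numbers : List Int) : List Int :=
  match pvLoopB [] question_numbers with
  | some fs => PySem.List.sorted fs (fun x => x) false
  | none => []   -- ValueError in Python; outside Pre_

-- ===== PRECONDITION & SPEC =====
-- Pre_ excludes exactly the inputs containing a question number outside 1..4000,
-- on which A raises ValueError.
def Pre_question_to_files (question_numbers : List Int) : Prop :=
  ∀ q ∈ question_numbers, 1 ≤ q ∧ q ≤ 4000
instance (question_numbers : List Int) : Decidable (Pre_question_to_files question_numbers) := by
  unfold Pre_question_to_files; infer_instance

def pvWitness_question_to_files : List Int := [64, 1, 375, 376, 4000]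

def Spec_question_to_files (question_numbers : List Int) (out : List Int) : Prop := out = question_to_files_alt question_numbers
instance (question_numbers : List Int) (out : List Int) : Decidable (Spec_question_to_files question_numbers out) := by unfold Spec_question_to_files; infer_instance

-- ===== CLAIM (what is proved, stated in full; the proofs are below) =====
def Claim_equal_question_to_files : Prop := ∀ (question_numbers : List Int), Dom_question_to_files question_numbers → Pre_question_to_files question_numbers → Spec_question_to_files question_numbers (question_to_files question_numbers)

-- ===== LEMMAS AND PROOFS =====

-- A's finished table agrees with B's closed form on every key 1..375
theorem pvFileMap_eq_closed (q : Int) (h1 : 1 ≤ q) (h2 : q ≤ 375) :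
    pvFileMapA.get? q = some (pvFilesB q) := by
  have h : ∀ x ∈ PySem.List.pyRange 1 376 1, pvFileMapA.get? x = some (pvFilesB x) := by decide
  exact h q (PySem.List.mem_pyRange_one.mpr ⟨h1, by omega⟩)

theorem pvLoop_eq (xs : List Int) : ∀ files : List Int,
    (∀ q ∈ xs, 1 ≤ q ∧ q ≤ 4000) →
    pvLoopA pvFileMapA files xs = pvLoopB files xs := by
  induction xs with
  | nil => intro files _; rfl
  | cons q rest ih =>
    intro files hpre
    have hq := hpre q (List.mem_cons_self ..)
    have hrest : ∀ x ∈ rest, 1 ≤ x ∧ x ≤ 4000 := fun x hx => hpre x (List.mem_cons_of_mem _ hx)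
    by_cases h375 : 1 ≤ q ∧ q ≤ 375
    · simp only [pvLoopA, pvLoopB, if_pos h375, pvFileMap_eq_closed q h375.1 h375.2]
      exact ih _ hrest
    · have h4000 : 376 ≤ q ∧ q ≤ 4000 := by omega
      simp only [pvLoopA, pvLoopB, if_neg h375, if_pos h4000]
      exact ih _ hrest

-- ===== VERDICT (by name: the statement is the Claim_ definition above) =====
theorem question_to_files_spec : Claim_equal_question_to_files := by
  intro xs _ hpre
  unfold Spec_question_to_files question_to_files question_to_files_alt
  rw [pvLoop_eq xs [] hpre]
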